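-- pv_equiv track=rewrite | github.com/wjdtkdgns777/BaekJoon | 프로그래머스/1/86491. 최소직사각형/최소직사각형.py | solution
-- ===== SOURCE A (Python) =====
-- def solution(sizes):
--     x_max = 0
--     y_max = 0
--     for i in range(len(sizes)):
--         x,y = sizes[i][0],sizes[i][1]
--         if y>=x:
--             x,y = y,x
--         if(x>x_max):
--             x_max = x
--         if(y>y_max):
--             y_max = y
--     answer = x_max*y_max
--
--
--
--
--
--
--
--     return answer
-- ===== SOURCE B (Python) =====
-- def _bounds(lst):
--     # (long-side bound, short-side bound) of the rectangles in lst, by divide and conquer;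
--     # the bound of the empty set of cards is 0 (hence the 0 floor in the one-card base case).
--     if len(lst) == 0:
--         return (0, 0)
--     if len(lst) == 1:
--         a, b = lst[0][0], lst[0][1]
--         return (max(a, b, 0), max(min(a, b), 0))
--     mid = len(lst) // 2
--     l1, s1 = _bounds(lst[:mid])
--     l2, s2 = _bounds(lst[mid:])
--     return (max(l1, l2), max(s1, s2))
--
-- def solution(sizes):
--     long_side, short_side = _bounds(sizes)
--     return long_side * short_side
-- ===== Notes on version B (the rewrite author's own statement) =====
-- stated objective: alternative
-- what changed: Replaces A's fused index loop with swap-and-track accumulators by a divide-and-conquer recursion: split the list in half, recursively compute (long-side bound, short-side bound) for each half, combine componentwise with max, multiply at the top.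
import Mathlib
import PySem

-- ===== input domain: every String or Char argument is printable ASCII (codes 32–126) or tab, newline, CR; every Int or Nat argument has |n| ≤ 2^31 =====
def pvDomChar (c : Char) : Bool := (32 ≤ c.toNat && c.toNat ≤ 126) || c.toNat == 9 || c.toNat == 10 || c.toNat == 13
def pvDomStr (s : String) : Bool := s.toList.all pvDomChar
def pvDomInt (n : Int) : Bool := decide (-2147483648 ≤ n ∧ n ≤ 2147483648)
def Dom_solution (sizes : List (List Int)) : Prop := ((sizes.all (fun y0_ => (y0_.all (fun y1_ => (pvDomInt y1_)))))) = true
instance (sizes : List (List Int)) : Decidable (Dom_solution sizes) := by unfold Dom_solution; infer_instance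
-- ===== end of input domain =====

-- B replaces A's fused swap-and-track loop by a divide-and-conquer recursion computing the (long, short) bounds of each half and combining with max; objective: alternative. Equivalence on inputs whose rows have >= 2 entries (Pre_).


-- ===== PORT A =====
-- literal port of A: loop over range(len(sizes)), swap so x ≥ y, track running maxima.
-- pyGetD … 0/[] is exact inside Pre_solution (all indices in range there).
def solutionStep (st : Int × Int) (row : List Int) : Int × Int :=
  let x0 := PySem.List.pyGetD row 0 0
  let y0 := PySem.List.pyGetD row 1 0
  let xy := if y0 ≥ x0 then (y0, x0) else (x0, y0)
  let x_max := if xy.1 > st.1 then xy.1 else st.1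
  let y_max := if xy.2 > st.2 then xy.2 else st.2
  (x_max, y_max)

def solution (sizes : List (List Int)) : Int :=
  let st := (PySem.List.pyRange 0 sizes.length 1).foldl
    (fun st i => solutionStep st (PySem.List.pyGetD sizes i [])) (0, 0)
  st.1 * st.2

-- ===== PORT B =====
-- literal port of Source B's _bounds: divide and conquer on the list; lst[:mid]/lst[mid:] with
-- 0 ≤ mid ≤ len are exactly List.take/List.drop.
def boundsB (l : List (List Int)) : Int × Int :=
  match l with
  | [] => (0, 0)
  | [p] =>
      let a := PySem.List.pyGetD p 0 0
      let b := PySem.List.pyGetD p 1 0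
      (max (max a b) 0, max (min a b) 0)
  | x :: y :: rest =>
      let mid := (x :: y :: rest).length / 2
      let r1 := boundsB ((x :: y :: rest).take mid)
      let r2 := boundsB ((x :: y :: rest).drop mid)
      (max r1.1 r2.1, max r1.2 r2.2)
termination_by l.length
decreasing_by
  · simp [List.length_take]; omega
  · simp; omega

def solution_alt (sizes : List (List Int)) : Int :=
  let bs := boundsB sizes
  bs.1 * bs.2

-- ===== PRECONDITION & SPEC =====
-- Pre_ excludes exactly the inputs where A raises IndexError: an inner list with fewer than 2 elements.
def Pre_solution (sizes : List (List Int)) : Prop := ∀ p ∈ sizes, 2 ≤ p.length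
instance (sizes : List (List Int)) : Decidable (Pre_solution sizes) := by unfold Pre_solution; infer_instance
def pvWitness_solution : List (List Int) := [[60, 50], [30, 70], [60, 30], [80, 40]]

def Spec_solution (sizes : List (List Int)) (out : Int) : Prop := out = solution_alt sizes
instance (sizes : List (List Int)) (out : Int) : Decidable (Spec_solution sizes out) := by unfold Spec_solution; infer_instance

-- ===== CLAIM (what is proved, stated in full; the proofs are below) =====
def Claim_equal_solution : Prop := ∀ (sizes : List (List Int)), Dom_solution sizes → Pre_solution sizes → Spec_solution sizes (solution sizes)

-- ===== LEMMAS AND PROOFS =====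
-- both programs compute (max of per-pair maxima) * (max of per-pair minima), seeded with 0
def pairMax (p : List Int) : Int := max (PySem.List.pyGetD p 0 0) (PySem.List.pyGetD p 1 0)
def pairMin (p : List Int) : Int := min (PySem.List.pyGetD p 0 0) (PySem.List.pyGetD p 1 0)
def boundsRef (l : List (List Int)) : Int × Int :=
  ((l.map pairMax).foldl max 0, (l.map pairMin).foldl max 0)

theorem foldl_max_shift (l : List Int) : ∀ a b : Int,
    l.foldl max (max a b) = max a (l.foldl max b) := by
  induction l with
  | nil => intro a b; rfl
  | cons x t ih =>
    intro a b
    simp only [List.foldl_cons, max_assoc, ih]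

theorem le_foldl_max (l : List Int) : ∀ a : Int, a ≤ l.foldl max a := by
  induction l with
  | nil => intro a; exact le_refl a
  | cons x t ih =>
    intro a
    exact le_trans (le_max_left a x) (ih (max a x))

theorem foldl_max_zero_append (f : List Int → Int) (xs ys : List (List Int)) :
    ((xs ++ ys).map f).foldl max 0 = max ((xs.map f).foldl max 0) ((ys.map f).foldl max 0) := by
  rw [List.map_append, List.foldl_append]
  have h0 : (xs.map f).foldl max 0 = max ((xs.map f).foldl max 0) 0 :=
    (max_eq_left (le_foldl_max _ 0)).symm
  conv_lhs => rw [h0]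
  rw [foldl_max_shift]

theorem boundsRef_append (xs ys : List (List Int)) :
    boundsRef (xs ++ ys) = (max (boundsRef xs).1 (boundsRef ys).1,
                            max (boundsRef xs).2 (boundsRef ys).2) := by
  simp only [boundsRef, foldl_max_zero_append]

-- B's divide and conquer computes the reference pair
theorem boundsB_eq (l : List (List Int)) : boundsB l = boundsRef l := by
  induction l using boundsB.induct with
  | case1 => simp [boundsB, boundsRef]
  | case2 p =>
    simp [boundsB, boundsRef, pairMax, pairMin, max_comm]
  | case3 x y rest _mid ih1 ih2 =>
    rw [boundsB]
    have hsplit : (x :: y :: rest) =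
        (x :: y :: rest).take ((x :: y :: rest).length / 2) ++
        (x :: y :: rest).drop ((x :: y :: rest).length / 2) :=
      (List.take_append_drop _ _).symm
    conv_rhs => rw [hsplit]
    rw [boundsRef_append, ih1, ih2]

-- A's fused pair-state fold step, rewritten lattice-style
theorem solution_step_eq (st : Int × Int) (p : List Int) :
    solutionStep st p = (max st.1 (pairMax p), max st.2 (pairMin p)) := by
  obtain ⟨a, b⟩ := st
  simp only [solutionStep, pairMax, pairMin, Prod.mk.injEq]
  split_ifs <;> constructor <;> simp [max_def, min_def] <;> split_ifs <;> omega

theorem solution_loop_split (l : List (List Int)) : ∀ (a b : Int),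
    l.foldl solutionStep (a, b)
    = ((l.map pairMax).foldl max a, (l.map pairMin).foldl max b) := by
  induction l with
  | nil => intro a b; rfl
  | cons p t ih =>
    intro a b
    simp only [List.foldl_cons, List.map_cons, solution_step_eq, ih]

-- ===== VERDICT (by name: the statement is the Claim_ definition above) =====
theorem solution_spec : Claim_equal_solution := by
  intro sizes _ _
  show solution sizes = solution_alt sizes
  unfold solution solution_alt
  rw [PySem.List.foldl_pyRange_zero_pyGetD' sizes ([] : List Int) solutionStep ((0 : Int), (0 : Int))]
  rw [solution_loop_split, boundsB_eq]
  rfl
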